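-- pv_equiv track=rewrite | github.com/kakumarabhishek/Corrected-Skin-Image-Datasets | Fitzpatrick17k/Fitzpatrick17k_Analysis/utils.py | make_complete_clusters
-- ===== SOURCE A (Python) =====
-- from typing import List, Set, Dict, Optional
--
-- class UnionFind:
--     """
--     The `UnionFind` class is a data structure that keeps track of a partition of a set
--     into disjoint subsets. It provides two main operations: `find()` and `union()`.
--     """
--
--     def __init__(self):
--         self.parent: Dict[str, str] = {}
--
--     def find(self, x: str) -> str:
--         """
--         The `find` method takes an element `x` as input and returns the root of the
--         subset that `x` belongs to. If `x` is not already in the `parent` dictionary,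
--         it adds `x` to the dictionary with `x` as its own parent and returns `x`. If
--         `x` is its own parent (meaning it's the root of its subset), it returns `x`.
--         Otherwise, it recursively calls `find` on the parent of `x` and updates the
--         parent of `x` to be the root of its subset. This process is known as path
--         compression and helps to keep the tree flat, improving the efficiency of
--         future operations.
--         """
--         if x not in self.parent:
--             self.parent[x] = x
--             return x
--         elif self.parent[x] == x:
--             return x
--         else:
--             self.parent[x] = self.find(self.parent[x])
--             return self.parent[x]
--
--     def union(self, x: str, y: str) -> None:
--         """
--         The `union` method takes two elements `x` and `y`, finds their roots using the
--         `find` method, and if they are not already in the same subset, it makes the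
--         root of `y`'s subset the parent of the root of `x`'s subset, effectively
--         merging the two subsets.
--         """
--         root_x = self.find(x)
--         root_y = self.find(y)
--         if root_x != root_y:
--             self.parent[root_x] = root_y
--
-- def make_complete_clusters(incomplete_clusters: List[List[str]]) -> List[List[str]]:
--     """
--     The `make_complete_clusters` function takes a list of incomplete clusters as input,
--     where each cluster is a list of elements. It initializes a `UnionFind` object and
--     for each pair of consecutive elements in each cluster, it calls the `union`
--     method to group them into the same subset. Then it creates a dictionary `clusters`
--     where each key is a root of a subset and its value is a list of all elements in
--     that subset. Finally, it returns a list of all clusters, where each cluster is a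
--     list of its elements in the same order as they appear in the clusters. This
--     function essentially completes the clusters by finding all connected components in
--     the graph where each cluster represents a connected component.
--     """
--     uf = UnionFind()
--
--     for cluster in incomplete_clusters:
--         for i in range(1, len(cluster)):
--             uf.union(cluster[i - 1], cluster[i])
--
--     clusters: Dict[str, List[str]] = {}
--     for item in uf.parent:
--         root = uf.find(item)
--         if root not in clusters:
--             clusters[root] = [item]
--         else:
--             clusters[root].append(item)
--
--     return [cluster for cluster in clusters.values()]
-- ===== SOURCE B (Python) =====
-- def make_complete_clusters(incomplete_clusters):
--     # Flat label-propagation connected components instead of a union-find forest: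
--     # every element carries its component label directly; a merge relabels in one scan.
--     label = {}
--     for cluster in incomplete_clusters:
--         for i in range(1, len(cluster)):
--             x, y = cluster[i - 1], cluster[i]
--             if x not in label:
--                 label[x] = x
--             if y not in label:
--                 label[y] = y
--             lx, ly = label[x], label[y]
--             if lx != ly:
--                 for k in label:
--                     if label[k] == lx:
--                         label[k] = ly
--     groups = {}
--     for v in label:
--         groups.setdefault(label[v], []).append(v)
--     return list(groups.values())
-- ===== Notes on version B (the rewrite author's own statement) =====
-- stated objective: simpler
-- what changed: Replaces the union-find parent forest (recursive find with path compression, root-chasing again in the final grouping pass) by a flat label dictionary: each element stores its component label directly, a union relabels one component in a single scan of the dictionary, and the final grouping is a plain label lookup.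
import Mathlib
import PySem

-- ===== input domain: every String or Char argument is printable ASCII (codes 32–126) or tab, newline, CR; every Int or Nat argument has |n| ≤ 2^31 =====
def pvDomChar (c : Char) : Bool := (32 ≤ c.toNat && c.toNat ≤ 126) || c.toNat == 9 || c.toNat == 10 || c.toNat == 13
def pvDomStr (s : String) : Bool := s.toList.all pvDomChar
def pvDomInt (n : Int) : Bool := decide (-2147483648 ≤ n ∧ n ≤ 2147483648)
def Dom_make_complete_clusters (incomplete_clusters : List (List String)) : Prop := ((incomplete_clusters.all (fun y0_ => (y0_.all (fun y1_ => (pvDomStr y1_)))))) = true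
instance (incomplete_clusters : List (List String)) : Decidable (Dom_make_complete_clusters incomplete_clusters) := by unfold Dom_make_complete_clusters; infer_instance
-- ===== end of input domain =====

-- B replaces A's union-find forest (recursive find with path compression) by flat
-- label-propagation: each element carries its component label and a merge relabels in
-- one scan — simpler code, same exact output (objective: simpler; no speed claim).


-- ===== PORT A =====
-- UnionFind.find, with fuel for the recursion on the parent chain; the fuel
-- (current dict size + 1) is proved sufficient below, so the fuel-0 branch is
-- never reached from the ports.
def ufFind : Nat → PySem.Dict String String → String → PySem.Dict String String × String
  | 0, p, x => (p, x)
  | fuel + 1, p, x =>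
    match p.get? x with
    | none => (p.insert x x, x)
    | some px =>
      if px = x then (p, x)
      else
        let res := ufFind fuel p px
        (res.1.insert x res.2, res.2)

-- UnionFind.union
def ufUnion (p : PySem.Dict String String) (x y : String) : PySem.Dict String String :=
  let r1 := ufFind (p.size + 1) p x
  let r2 := ufFind (r1.1.size + 1) r1.1 y
  if r1.2 ≠ r2.2 then r2.1.insert r1.2 r2.2 else r2.1

-- inner loop: for i in range(1, len(cluster)): uf.union(cluster[i-1], cluster[i])
-- (indices are always in range, so the IndexError default "" is never used)
def ufEdges (p : PySem.Dict String String) (cluster : List String) : PySem.Dict String String :=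
  (PySem.List.pyRange 1 (cluster.length : Int) 1).foldl
    (fun p i => ufUnion p ((PySem.List.pyGet? cluster (i - 1)).getD "") ((PySem.List.pyGet? cluster i).getD "")) p

-- body of: for item in uf.parent: root = uf.find(item); …
def groupStepA (st : PySem.Dict String (List String) × PySem.Dict String String) (item : String) :
    PySem.Dict String (List String) × PySem.Dict String String :=
  let fr := ufFind (st.2.size + 1) st.2 item
  match st.1.get? fr.2 with
  | none => (st.1.insert fr.2 [item], fr.1)
  | some l => (st.1.insert fr.2 (l ++ [item]), fr.1)

-- Python iterates the live dict `uf.parent`; the loop only changes values (path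
-- compression), never the key set or order, so folding over the initial key list
-- while threading the mutated dict is exact.
def make_complete_clusters (incomplete_clusters : List (List String)) : List (List String) :=
  let parent := incomplete_clusters.foldl ufEdges (PySem.Dict.mk [])
  (parent.keys.foldl groupStepA (PySem.Dict.mk [], parent)).1.values

-- ===== PORT B =====
-- for k in label: if label[k] == a: label[k] = b   (values updated in place, keys untouched)
def relabel (d : PySem.Dict String String) (a b : String) : PySem.Dict String String :=
  PySem.Dict.mk (d.items.map (fun kv => (kv.1, if kv.2 = a then b else kv.2)))

-- body of B's edge loop
def bStep (lab : PySem.Dict String String) (x y : String) : PySem.Dict String String :=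
  let lab := if lab.contains x then lab else lab.insert x x
  let lab := if lab.contains y then lab else lab.insert y y
  let lx := lab.getD x ""
  let ly := lab.getD y ""
  if lx ≠ ly then relabel lab lx ly else lab

def bEdges (lab : PySem.Dict String String) (cluster : List String) : PySem.Dict String String :=
  (PySem.List.pyRange 1 (cluster.length : Int) 1).foldl
    (fun lab i => bStep lab ((PySem.List.pyGet? cluster (i - 1)).getD "") ((PySem.List.pyGet? cluster i).getD "")) lab

-- groups.setdefault(label[v], []).append(v)
def groupStepB (lab : PySem.Dict String String) (g : PySem.Dict String (List String)) (v : String) :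
    PySem.Dict String (List String) :=
  match g.get? (lab.getD v "") with
  | none => g.insert (lab.getD v "") [v]
  | some l => g.insert (lab.getD v "") (l ++ [v])

def make_complete_clusters_alt (incomplete_clusters : List (List String)) : List (List String) :=
  let lab := incomplete_clusters.foldl bEdges (PySem.Dict.mk [])
  (lab.keys.foldl (groupStepB lab) (PySem.Dict.mk [])).values

-- ===== PRECONDITION & SPEC =====
def Spec_make_complete_clusters (incomplete_clusters : List (List String)) (out : List (List String)) : Prop := out = make_complete_clusters_alt incomplete_clusters
instance (incomplete_clusters : List (List String)) (out : List (List String)) : Decidable (Spec_make_complete_clusters incomplete_clusters out) := by unfold Spec_make_complete_clusters; infer_instance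

-- ===== CLAIM (what is proved, stated in full; the proofs are below) =====
def Claim_equal_make_complete_clusters : Prop := ∀ (incomplete_clusters : List (List String)), Dom_make_complete_clusters incomplete_clusters → Spec_make_complete_clusters incomplete_clusters (make_complete_clusters incomplete_clusters)

-- ===== LEMMAS AND PROOFS =====

-- one step along the parent chain (missing key = stay put, matching find's insert-self)
def pstep (p : PySem.Dict String String) (x : String) : String := p.getD x x

def iterP (p : PySem.Dict String String) : Nat → String → String
  | 0, x => x
  | n + 1, x => iterP p n (pstep p x)

def Reach (p : PySem.Dict String String) (x r : String) : Prop := ∃ n, iterP p n x = r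

-- The coupling invariant: lab is B's flat labelling, p is A's parent forest; every
-- key's label is the label of its parent, labels are self-parented self-labelled
-- roots, and every key reaches its label along the parent chain.
def UFInv (p lab : PySem.Dict String String) : Prop :=
  p.keys = lab.keys ∧ p.keys.Nodup ∧
  ∀ x ∈ p.keys, ∃ px r,
    p.get? x = some px ∧ lab.get? x = some r ∧
    px ∈ p.keys ∧ lab.get? px = some r ∧
    r ∈ p.keys ∧ p.get? r = some r ∧ lab.get? r = some r ∧
    Reach p x r

lemma iterP_succ' (p : PySem.Dict String String) (n : Nat) (x : String) :
    iterP p (n + 1) x = pstep p (iterP p n x) := by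
  induction n generalizing x with
  | zero => rfl
  | succ n ih => simp only [iterP]; exact ih (pstep p x)

lemma iterP_add (p : PySem.Dict String String) (a b : Nat) (x : String) :
    iterP p (a + b) x = iterP p b (iterP p a x) := by
  induction b with
  | zero => rfl
  | succ b ih => rw [← Nat.add_assoc, iterP_succ', iterP_succ', ih]

lemma iterP_fix (p : PySem.Dict String String) (r : String) (h : pstep p r = r) :
    ∀ n, iterP p n r = r := by
  intro n; induction n with
  | zero => rfl
  | succ n ih => rw [iterP_succ', ih, h]

lemma root_unique (p : PySem.Dict String String) {x r1 r2 : String} {n m : Nat}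
    (h1 : iterP p n x = r1) (hf1 : pstep p r1 = r1)
    (h2 : iterP p m x = r2) (hf2 : pstep p r2 = r2) : r1 = r2 := by
  have e1 : iterP p (n + m) x = r1 := by rw [iterP_add, h1, iterP_fix p r1 hf1]
  have e2 : iterP p (n + m) x = r2 := by rw [Nat.add_comm, iterP_add, h2, iterP_fix p r2 hf2]
  rw [← e1, e2]

lemma iterP_mem (p : PySem.Dict String String) (hcl : ∀ y ∈ p.keys, pstep p y ∈ p.keys)
    {x : String} (hx : x ∈ p.keys) : ∀ n, iterP p n x ∈ p.keys := by
  intro n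
  induction n generalizing x with
  | zero => exact hx
  | succ n ih => simp only [iterP]; exact ih (hcl x hx)

-- pigeonhole: a path to a fixpoint inside the key set can be shortened below the key count
lemma reach_short (p : PySem.Dict String String) (hcl : ∀ y ∈ p.keys, pstep p y ∈ p.keys)
    {x r : String} (hx : x ∈ p.keys) (_hf : pstep p r = r) (hre : Reach p x r) :
    ∃ m < p.keys.length, iterP p m x = r := by
  have hex : ∃ k, iterP p k x = r := hre
  have hspec : iterP p (Nat.find hex) x = r := Nat.find_spec hex
  by_cases hlt : Nat.find hex < p.keys.length
  · exact ⟨Nat.find hex, hlt, hspec⟩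
  exfalso
  rw [not_lt] at hlt
  set m := Nat.find hex with hmdef
  have key : ∀ i j : Fin (m + 1), (i : Nat) < (j : Nat) → iterP p i x ≠ iterP p j x := by
    intro i j hij heq
    have hjm : (j : Nat) ≤ m := Nat.lt_succ_iff.mp j.isLt
    have hiter : iterP p ((i : Nat) + (m - (j : Nat))) x = r := by
      rw [iterP_add, heq, ← iterP_add, Nat.add_sub_cancel' hjm, hspec]
    exact Nat.find_min hex (by omega) hiter
  have hinj : Function.Injective (fun i : Fin (m + 1) => iterP p (i : Nat) x) := by
    intro i j heq
    by_contra hne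
    rcases Nat.lt_or_ge (i : Nat) (j : Nat) with hlt' | hge
    · exact key i j hlt' heq
    · rcases Nat.lt_or_ge (j : Nat) (i : Nat) with hlt'' | hge'
      · exact key j i hlt'' heq.symm
      · exact hne (Fin.ext (le_antisymm hge' hge))
  have hcard : (Finset.univ : Finset (Fin (m + 1))).card ≤ p.keys.toFinset.card := by
    apply Finset.card_le_card_of_injOn (fun i : Fin (m + 1) => iterP p (i : Nat) x)
    · intro i _
      exact List.mem_toFinset.mpr (iterP_mem p hcl hx (i : Nat))
    · exact fun a _ b _ h => hinj h
  have := List.toFinset_card_le p.keys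
  simp [Finset.card_univ] at hcard
  omega

lemma pstep_insert (p : PySem.Dict String String) (a b y : String) :
    pstep (p.insert a b) y = if y = a then b else pstep p y := by
  simp [pstep, PySem.Dict.getD_insert]

-- reach is preserved when a key is repointed to its own root (path compression step)
lemma iter_insert_root (p : PySem.Dict String String) {x rx : String}
    (hxr : Reach p x rx) (hfx : pstep p rx = rx) :
    ∀ n y r, iterP p n y = r → pstep p r = r → Reach (p.insert x rx) y r := by
  intro n
  induction n with
  | zero => intro y r h _; exact ⟨0, h⟩
  | succ n ih =>
    intro y r h hfr
    by_cases hy : y = x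
    · subst hy
      obtain ⟨k, hk⟩ := hxr
      have hrrx : rx = r := root_unique p hk hfx h hfr
      refine ⟨1, ?_⟩
      show iterP (p.insert y rx) 0 (pstep (p.insert y rx) y) = r
      rw [pstep_insert]
      simp [hrrx, iterP]
    · obtain ⟨k, hk⟩ := ih (pstep p y) r h hfr
      refine ⟨k + 1, ?_⟩
      show iterP (p.insert x rx) k (pstep (p.insert x rx) y) = r
      rw [pstep_insert, if_neg hy]
      exact hk

-- reach to a root a survives pointing a somewhere else, provided the target is ≠ a
lemma iter_insert_avoid (p : PySem.Dict String String) {a b : String} (hfa : pstep p a = a) :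
    ∀ n y r, iterP p n y = r → r ≠ a → Reach (p.insert a b) y r := by
  intro n
  induction n with
  | zero => intro y r h _; exact ⟨0, h⟩
  | succ n ih =>
    intro y r h hra
    by_cases hy : y = a
    · subst hy
      rw [show iterP p (n + 1) y = iterP p n (pstep p y) from rfl, hfa, iterP_fix p y hfa] at h
      exact absurd h.symm hra
    · obtain ⟨k, hk⟩ := ih (pstep p y) r h hra
      refine ⟨k + 1, ?_⟩
      show iterP (p.insert a b) k (pstep (p.insert a b) y) = r
      rw [pstep_insert, if_neg hy]
      exact hk

-- pointing root a at root b redirects everything that reached a to b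
lemma iter_insert_redirect (p : PySem.Dict String String) {a b : String}
    (hfa : pstep p a = a) (_hfb : pstep p b = b) (hab : b ≠ a) :
    ∀ n y, iterP p n y = a → Reach (p.insert a b) y b := by
  intro n
  induction n with
  | zero =>
    intro y h
    subst h
    refine ⟨1, ?_⟩
    show iterP (p.insert (iterP p 0 y) b) 0 (pstep (p.insert (iterP p 0 y) b) y) = b
    rw [pstep_insert]
    simp [iterP]
  | succ n ih =>
    intro y h
    by_cases hy : y = a
    · subst hy
      refine ⟨1, ?_⟩
      show iterP (p.insert y b) 0 (pstep (p.insert y b) y) = b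
      rw [pstep_insert]
      simp [iterP]
    · obtain ⟨k, hk⟩ := ih (pstep p y) h
      refine ⟨k + 1, ?_⟩
      show iterP (p.insert a b) k (pstep (p.insert a b) y) = b
      rw [pstep_insert, if_neg hy]
      exact hk

lemma pstep_of_get? {p : PySem.Dict String String} {x v : String} (h : p.get? x = some v) :
    pstep p x = v := by
  simp [pstep, PySem.Dict.getD_eq_get?_getD, h]

lemma pstep_of_not_mem {p : PySem.Dict String String} {x : String} (h : x ∉ p.keys) :
    pstep p x = x := by
  simp [pstep, PySem.Dict.getD_eq_get?_getD, (PySem.Dict.get?_eq_none_iff_not_mem_keys p x).2 h]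

lemma inv_closed {p lab : PySem.Dict String String} (h : UFInv p lab) :
    ∀ y ∈ p.keys, pstep p y ∈ p.keys := by
  intro y hy
  obtain ⟨py, r, hpy, _, hpym, _⟩ := h.2.2 y hy
  rw [pstep_of_get? hpy]; exact hpym

-- path compression preserves the invariant
lemma insert_root_inv {p lab : PySem.Dict String String} (h : UFInv p lab) {x r : String}
    (hx : x ∈ p.keys) (hr : lab.get? x = some r) : UFInv (p.insert x r) lab := by
  obtain ⟨hk, hnd, hcl⟩ := h
  obtain ⟨px0, r0, hpx0, hlx0, hpxm, hlpx0, hrm, hpr, hlr, hre⟩ := hcl x hx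
  have hr0 : r0 = r := Option.some_inj.mp (hlx0.symm.trans hr)
  subst hr0
  have hc : p.contains x = true := (PySem.Dict.contains_iff_mem_keys p x).2 hx
  have hkeq : (p.insert x r0).keys = p.keys := PySem.Dict.keys_insert_of_contains p r0 hc
  refine ⟨hkeq.trans hk, hkeq ▸ hnd, ?_⟩
  intro y hy
  rw [hkeq] at hy
  by_cases hyx : y = x
  · subst hyx
    refine ⟨r0, r0, PySem.Dict.get?_insert_self _ _ _, hr, hkeq ▸ hrm, hlr, hkeq ▸ hrm, ?_, hlr, ?_⟩
    · by_cases hrx : r0 = y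
      · subst hrx; exact PySem.Dict.get?_insert_self _ _ _
      · rw [PySem.Dict.get?_insert_of_ne _ _ hrx]; exact hpr
    · refine ⟨1, ?_⟩
      show iterP (p.insert y r0) 0 (pstep (p.insert y r0) y) = r0
      rw [pstep_insert]
      simp [iterP]
  · obtain ⟨py, ry, hpy, hly, hpym, hlpy, hrym, hpry, hlry, hrey⟩ := hcl y hy
    refine ⟨py, ry, ?_, hly, hkeq ▸ hpym, hlpy, hkeq ▸ hrym, ?_, hlry, ?_⟩
    · rw [PySem.Dict.get?_insert_of_ne _ _ hyx]; exact hpy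
    · by_cases hryx : ry = x
      · subst hryx
        have : r0 = ry := Option.some_inj.mp (hr.symm.trans hlry)
        rw [PySem.Dict.get?_insert_self, this]
      · rw [PySem.Dict.get?_insert_of_ne _ _ hryx]; exact hpry
    · obtain ⟨n, hn⟩ := hrey
      exact iter_insert_root p hre (pstep_of_get? hpr) n y ry hn (pstep_of_get? hpry)

-- the relabel step of B paired with A's root-redirect preserves the invariant
lemma relabel_get? (d : PySem.Dict String String) (a b k : String) :
    (relabel d a b).get? k = (d.get? k).map (fun v => if v = a then b else v) := by
  obtain ⟨items⟩ := d
  induction items with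
  | nil => rfl
  | cons kv rest ih =>
    show (PySem.Dict.mk ((kv.1, if kv.2 = a then b else kv.2) :: rest.map _)).get? k = _
    rw [PySem.Dict.get?_mk_cons]
    by_cases hk : (kv.1 == k) = true
    · simp only [hk, if_true]
      show _ = (PySem.Dict.get? (PySem.Dict.mk (kv :: rest)) k).map _
      rw [PySem.Dict.get?_mk_cons]
      simp [hk]
    · simp only [hk]
      show _ = (PySem.Dict.get? (PySem.Dict.mk (kv :: rest)) k).map _
      rw [PySem.Dict.get?_mk_cons]
      simp only [hk]
      exact ih

lemma relabel_keys (d : PySem.Dict String String) (a b : String) :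
    (relabel d a b).keys = d.keys := by
  simp [relabel, PySem.Dict.keys]

lemma relabel_inv {p lab : PySem.Dict String String} (h : UFInv p lab) {rx ry : String}
    (hrx : rx ∈ p.keys) (hprx : p.get? rx = some rx) (hlrx : lab.get? rx = some rx)
    (hry : ry ∈ p.keys) (hpry : p.get? ry = some ry) (hlry : lab.get? ry = some ry)
    (hne : rx ≠ ry) : UFInv (p.insert rx ry) (relabel lab rx ry) := by
  obtain ⟨hk, hnd, hcl⟩ := h
  have hc : p.contains rx = true := (PySem.Dict.contains_iff_mem_keys p rx).2 hrx
  have hkeq : (p.insert rx ry).keys = p.keys := PySem.Dict.keys_insert_of_contains p ry hc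
  have hryx : ry ≠ rx := fun e => hne e.symm
  refine ⟨by rw [hkeq, relabel_keys, hk], hkeq ▸ hnd, ?_⟩
  intro y hy
  rw [hkeq] at hy
  by_cases hyx : y = rx
  · subst hyx
    refine ⟨ry, ry, PySem.Dict.get?_insert_self _ _ _, ?_, hkeq ▸ hry, ?_, hkeq ▸ hry, ?_, ?_, ?_⟩
    · rw [relabel_get?, hlrx]; simp
    · rw [relabel_get?, hlry]; simp [hryx]
    · rw [PySem.Dict.get?_insert_of_ne _ _ hryx]; exact hpry
    · rw [relabel_get?, hlry]; simp [hryx]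
    · refine ⟨1, ?_⟩
      show iterP (p.insert y ry) 0 (pstep (p.insert y ry) y) = ry
      rw [pstep_insert]
      simp [iterP]
  · obtain ⟨py, r, hpy, hly, hpym, hlpy, hrm, hpr, hlr, hrey⟩ := hcl y hy
    by_cases hrrx : r = rx
    · subst hrrx
      refine ⟨py, ry, ?_, ?_, hkeq ▸ hpym, ?_, hkeq ▸ hry, ?_, ?_, ?_⟩
      · rw [PySem.Dict.get?_insert_of_ne _ _ hyx]; exact hpy
      · rw [relabel_get?, hly]; simp
      · rw [relabel_get?, hlpy]; simp
      · rw [PySem.Dict.get?_insert_of_ne _ _ hryx]; exact hpry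
      · rw [relabel_get?, hlry]; simp [hryx]
      · obtain ⟨n, hn⟩ := hrey
        exact iter_insert_redirect p (pstep_of_get? hprx) (pstep_of_get? hpry) hryx n y hn
    · refine ⟨py, r, ?_, ?_, hkeq ▸ hpym, ?_, hkeq ▸ hrm, ?_, ?_, ?_⟩
      · rw [PySem.Dict.get?_insert_of_ne _ _ hyx]; exact hpy
      · rw [relabel_get?, hly]; simp [hrrx]
      · rw [relabel_get?, hlpy]; simp [hrrx]
      · rw [PySem.Dict.get?_insert_of_ne _ _ hrrx]; exact hpr
      · rw [relabel_get?, hlr]; simp [hrrx]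
      · obtain ⟨n, hn⟩ := hrey
        exact iter_insert_avoid p (pstep_of_get? hprx) n y r hn hrrx

-- running find on a present key returns its label and compresses only
lemma find_go {lab : PySem.Dict String String} {r : String} :
    ∀ n (p : PySem.Dict String String) (x : String) fuel, UFInv p lab → x ∈ p.keys →
      lab.get? x = some r → iterP p n x = r → n < fuel →
      ∃ p', ufFind fuel p x = (p', r) ∧ UFInv p' lab ∧ p'.keys = p.keys := by
  intro n
  induction n with
  | zero =>
    intro p x fuel h hx hlx hit _
    have hxr : x = r := hit
    obtain ⟨px, r0, hpx, hlx0, _, _, _, hpr, _, _⟩ := h.2.2 x hx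
    have hr0 : r0 = r := Option.some_inj.mp (hlx0.symm.trans hlx)
    have hprx : p.get? x = some x := by rw [hxr, ← hr0]; exact hpr
    have hpxx : px = x := Option.some_inj.mp (hpx.symm.trans hprx)
    obtain ⟨f, rfl⟩ : ∃ f, fuel = f + 1 := ⟨fuel - 1, by omega⟩
    refine ⟨p, ?_, h, rfl⟩
    rw [← hxr]
    simp [ufFind, hpx, hpxx]
  | succ n ih =>
    intro p x fuel h hx hlx hit hf
    obtain ⟨f, rfl⟩ : ∃ f, fuel = f + 1 := ⟨fuel - 1, by omega⟩
    obtain ⟨px, r0, hpx, hlx0, hpxm, hlpx, hrm, hpr, hlr, hre⟩ := h.2.2 x hx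
    have hr0 : r0 = r := Option.some_inj.mp (hlx0.symm.trans hlx)
    rw [hr0] at hlx0 hlpx hrm hpr hlr hre
    by_cases hpxx : px = x
    · have hfix : pstep p x = x := pstep_of_get? (hpxx ▸ hpx)
      have hiter : iterP p (n + 1) x = x := iterP_fix p x hfix (n + 1)
      have hrx : r = x := by rw [← hit, hiter]
      refine ⟨p, ?_, h, rfl⟩
      simp [ufFind, hpx, hpxx, hrx]
    · have hstep : pstep p x = px := pstep_of_get? hpx
      have hitpx : iterP p n px = r := by
        have : iterP p (n + 1) x = iterP p n (pstep p x) := rfl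
        rw [this, hstep] at hit
        exact hit
      obtain ⟨p1, he1, h1, hk1⟩ := ih p px f h hpxm hlpx hitpx (by omega)
      have hx1 : x ∈ p1.keys := hk1 ▸ hx
      refine ⟨p1.insert x r, ?_, insert_root_inv h1 hx1 hlx, ?_⟩
      · simp [ufFind, hpx, hpxx, he1]
      · rw [PySem.Dict.keys_insert_of_contains p1 r ((PySem.Dict.contains_iff_mem_keys p1 x).2 hx1)]
        exact hk1

lemma size_eq_keys_length (d : PySem.Dict String String) : d.size = d.keys.length := by
  simp [PySem.Dict.size, PySem.Dict.keys]

lemma find_run {p lab : PySem.Dict String String} (h : UFInv p lab) {x : String}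
    (hx : x ∈ p.keys) :
    ∃ p' r, ufFind (p.size + 1) p x = (p', r) ∧ lab.get? x = some r ∧
      UFInv p' lab ∧ p'.keys = p.keys := by
  obtain ⟨px, r, hpx, hlx, hpxm, hlpx, hrm, hpr, hlr, hre⟩ := h.2.2 x hx
  obtain ⟨m, hm, hit⟩ := reach_short p (inv_closed h) hx (pstep_of_get? hpr) hre
  obtain ⟨p', he, h', hk⟩ := find_go m p x (p.size + 1) h hx hlx hit
    (by rw [size_eq_keys_length]; omega)
  exact ⟨p', r, he, hlx, h', hk⟩

lemma find_fresh {p lab : PySem.Dict String String} (h : UFInv p lab) {x : String}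
    (hx : x ∉ p.keys) (fuel : Nat) :
    ufFind (fuel + 1) p x = (p.insert x x, x) ∧ UFInv (p.insert x x) (lab.insert x x) := by
  obtain ⟨hk, hnd, hcl⟩ := h
  have hg : p.get? x = none := (PySem.Dict.get?_eq_none_iff_not_mem_keys p x).2 hx
  have hxl : x ∉ lab.keys := hk ▸ hx
  have hcp : p.contains x = false := by
    rw [Bool.eq_false_iff]
    intro hc
    exact hx ((PySem.Dict.contains_iff_mem_keys p x).1 hc)
  have hclab : lab.contains x = false := by
    rw [Bool.eq_false_iff]
    intro hc
    exact hxl ((PySem.Dict.contains_iff_mem_keys lab x).1 hc)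
  have hkp : (p.insert x x).keys = p.keys ++ [x] := PySem.Dict.keys_insert_of_not_contains p x hcp
  have hkl : (lab.insert x x).keys = lab.keys ++ [x] := PySem.Dict.keys_insert_of_not_contains lab x hclab
  refine ⟨by simp [ufFind, hg], by rw [hkp, hkl, hk], PySem.Dict.nodup_keys_insert p x x hnd, ?_⟩
  intro y hy
  rw [hkp, List.mem_append] at hy
  rcases hy with hy | hy
  · have hyx : y ≠ x := fun e => hx (e ▸ hy)
    obtain ⟨py, ry, hpy, hly, hpym, hlpy, hrym, hpry, hlry, hrey⟩ := hcl y hy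
    have hpyx : py ≠ x := fun e => hx (e ▸ hpym)
    have hryx : ry ≠ x := fun e => hx (e ▸ hrym)
    refine ⟨py, ry, ?_, ?_, ?_, ?_, ?_, ?_, ?_, ?_⟩
    · rw [PySem.Dict.get?_insert_of_ne _ _ hyx]; exact hpy
    · rw [PySem.Dict.get?_insert_of_ne _ _ hyx]; exact hly
    · rw [hkp]; exact List.mem_append_left _ hpym
    · rw [PySem.Dict.get?_insert_of_ne _ _ hpyx]; exact hlpy
    · rw [hkp]; exact List.mem_append_left _ hrym
    · rw [PySem.Dict.get?_insert_of_ne _ _ hryx]; exact hpry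
    · rw [PySem.Dict.get?_insert_of_ne _ _ hryx]; exact hlry
    · obtain ⟨n, hn⟩ := hrey
      exact iter_insert_avoid p (pstep_of_not_mem hx) n y ry hn hryx
  · rw [List.mem_singleton] at hy
    subst hy
    refine ⟨y, y, PySem.Dict.get?_insert_self _ _ _, PySem.Dict.get?_insert_self _ _ _, ?_, PySem.Dict.get?_insert_self _ _ _, ?_, PySem.Dict.get?_insert_self _ _ _, PySem.Dict.get?_insert_self _ _ _, ⟨0, rfl⟩⟩
    · rw [hkp]; exact List.mem_append_right _ (List.mem_singleton.mpr rfl)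
    · rw [hkp]; exact List.mem_append_right _ (List.mem_singleton.mpr rfl)

lemma mem_of_get?_some {d : PySem.Dict String String} {k v : String}
    (h : d.get? k = some v) : k ∈ d.keys := by
  by_contra hk
  rw [(PySem.Dict.get?_eq_none_iff_not_mem_keys d k).2 hk] at h
  cases h

-- one find call of union paired with one "insert-if-missing" of B
lemma find_step {p lab : PySem.Dict String String} (h : UFInv p lab) (x : String) :
    ∃ p1 rx, ufFind (p.size + 1) p x = (p1, rx) ∧
      UFInv p1 (if lab.contains x then lab else lab.insert x x) ∧
      (if lab.contains x then lab else lab.insert x x).get? x = some rx ∧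
      (∀ z v, lab.get? z = some v → (if lab.contains x then lab else lab.insert x x).get? z = some v) := by
  by_cases hx : x ∈ p.keys
  · have hc : lab.contains x = true := (PySem.Dict.contains_iff_mem_keys lab x).2 (h.1 ▸ hx)
    rw [hc]
    obtain ⟨p', r, he, hlx, h', hk⟩ := find_run h hx
    exact ⟨p', r, he, by simpa using h', by simpa using hlx, fun z v hv => by simpa using hv⟩
  · have hxl : x ∉ lab.keys := h.1 ▸ hx
    have hc : lab.contains x = false := by
      rw [Bool.eq_false_iff]
      intro hcc
      exact hxl ((PySem.Dict.contains_iff_mem_keys lab x).1 hcc)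
    rw [hc]
    obtain ⟨he, h'⟩ := find_fresh h hx p.size
    refine ⟨p.insert x x, x, he, by simpa using h', by simp [PySem.Dict.get?_insert_self], ?_⟩
    intro z v hv
    have hz : z ≠ x := fun e => hxl (e ▸ mem_of_get?_some hv)
    simpa [PySem.Dict.get?_insert_of_ne _ _ hz] using hv

lemma union_spec {p lab : PySem.Dict String String} (h : UFInv p lab) (x y : String) :
    UFInv (ufUnion p x y) (bStep lab x y) := by
  obtain ⟨p1, rx, he1, h1, hgx1, hmono1⟩ := find_step h x
  obtain ⟨p2, ry, he2, h2, hgy2, hmono2⟩ := find_step h1 y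
  set lab1 := if lab.contains x then lab else lab.insert x x with hl1
  set lab2 := if lab1.contains y then lab1 else lab1.insert y y with hl2
  have hgx2 : lab2.get? x = some rx := hmono2 x rx hgx1
  have hdx : lab2.getD x "" = rx := PySem.Dict.getD_of_get?_eq_some _ _ hgx2
  have hdy : lab2.getD y "" = ry := PySem.Dict.getD_of_get?_eq_some _ _ hgy2
  have hu : ufUnion p x y = if rx ≠ ry then p2.insert rx ry else p2 := by
    simp only [ufUnion, he1, he2]
  have hb : bStep lab x y = if rx ≠ ry then relabel lab2 rx ry else lab2 := by
    simp only [bStep, ← hl1, ← hl2, hdx, hdy]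
  rw [hu, hb]
  by_cases hne : rx = ry
  · simp only [hne, ne_eq, not_true_eq_false, if_false]
    exact h2
  · simp only [ne_eq, hne, not_false_eq_true, if_true]
    have hxm : x ∈ p2.keys := h2.1 ▸ mem_of_get?_some hgx2
    have hym : y ∈ p2.keys := h2.1 ▸ mem_of_get?_some hgy2
    obtain ⟨pxx, r0, _, hlx0, _, _, hrm, hpr, hlr, _⟩ := h2.2.2 x hxm
    have hr0 : r0 = rx := Option.some_inj.mp (hlx0.symm.trans hgx2)
    rw [hr0] at hrm hpr hlr
    obtain ⟨pyy, r1, _, hly1, _, _, hrm1, hpr1, hlr1, _⟩ := h2.2.2 y hym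
    have hr1 : r1 = ry := Option.some_inj.mp (hly1.symm.trans hgy2)
    rw [hr1] at hrm1 hpr1 hlr1
    exact relabel_inv h2 hrm hpr hlr hrm1 hpr1 hlr1 hne

lemma foldl_pair {α β γ : Type} (R : α → β → Prop) (f : α → γ → α) (g : β → γ → β)
    (hstep : ∀ a b c, R a b → R (f a c) (g b c)) :
    ∀ (l : List γ) a b, R a b → R (l.foldl f a) (l.foldl g b) := by
  intro l
  induction l with
  | nil => intro a b h; exact h
  | cons c l ih => intro a b h; exact ih _ _ (hstep a b c h)

lemma group_loop {lab : PySem.Dict String String} :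
    ∀ (ks : List String) (p : PySem.Dict String String) (cl : PySem.Dict String (List String)),
      UFInv p lab → (∀ k ∈ ks, k ∈ p.keys) →
      (ks.foldl groupStepA (cl, p)).1 = ks.foldl (groupStepB lab) cl := by
  intro ks
  induction ks with
  | nil => intro p cl _ _; rfl
  | cons k ks ih =>
    intro p cl h hs
    obtain ⟨p', r, he, hlk, h', hk'⟩ := find_run h (hs k (List.mem_cons_self ..))
    have hd : lab.getD k "" = r := PySem.Dict.getD_of_get?_eq_some _ _ hlk
    have hstep : groupStepA (cl, p) k = (groupStepB lab cl k, p') := by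
      simp only [groupStepA, groupStepB, he, hd]
      cases cl.get? r <;> rfl
    rw [List.foldl_cons, List.foldl_cons, hstep]
    exact ih p' (groupStepB lab cl k) h' (fun j hj => hk' ▸ hs j (List.mem_cons_of_mem _ hj))

-- ===== VERDICT (by name: the statement is the Claim_ definition above) =====
set_option maxHeartbeats 1000000 in
theorem make_complete_clusters_spec : Claim_equal_make_complete_clusters := by
  intro ics _
  unfold Spec_make_complete_clusters
  simp only [make_complete_clusters, make_complete_clusters_alt]
  have h0 : UFInv (PySem.Dict.mk ([] : List (String × String))) (PySem.Dict.mk []) := by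
    refine ⟨rfl, ?_, ?_⟩
    · simp [PySem.Dict.keys]
    · intro z hz
      simp [PySem.Dict.keys] at hz
  have hstep : ∀ (p labd : PySem.Dict String String) cluster, UFInv p labd →
      UFInv (ufEdges p cluster) (bEdges labd cluster) := by
    intro p labd cluster hpl
    unfold ufEdges bEdges
    exact foldl_pair UFInv
      (fun q i => ufUnion q ((PySem.List.pyGet? cluster (i - 1)).getD "") ((PySem.List.pyGet? cluster i).getD ""))
      (fun lb i => bStep lb ((PySem.List.pyGet? cluster (i - 1)).getD "") ((PySem.List.pyGet? cluster i).getD ""))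
      (fun a b i hab => union_spec hab _ _) _ p labd hpl
  have hmain := foldl_pair UFInv ufEdges bEdges (fun a b c hab => hstep a b c hab) ics _ _ h0
  set parent := ics.foldl ufEdges (PySem.Dict.mk []) with hp
  set labd := ics.foldl bEdges (PySem.Dict.mk []) with hl
  have hg := group_loop parent.keys parent (PySem.Dict.mk []) hmain (fun k hk => hk)
  rw [hg, hmain.1]
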